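-- pv_equiv track=rewrite | github.com/Kevinge666/ICS33 | solution/q1solution.py | by_skill
-- ===== SOURCE A (Python) =====
-- from collections import defaultdict  # Use or ignore
--
-- def by_skill(db1 : {str:{str:int}}) -> [int,[str,[str]]]:
--     answer = defaultdict(lambda : defaultdict(list))
--     for name,job_rankings in db1.items():
--         for job,ranking in job_rankings.items():
--             answer[ranking][job].append(name)
--     for ranking,data in answer.items():
--         answer[ranking] = [(job,sorted(people)) for job,people in sorted(data.items())]
--     return sorted(answer.items(), reverse = True)
-- ===== SOURCE B (Python) =====
-- def _runs(items, key):
--     """Split a key-contiguous list into (key, [items...]) runs, front to back."""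
--     runs = []
--     for x in reversed(items):
--         if runs and runs[0][0] == key(x):
--             runs[0][1].insert(0, x)
--         else:
--             runs.insert(0, (key(x), [x]))
--     return runs
--
-- def by_skill(db1):
--     triples = [(r, j, n) for n, jr in db1.items() for j, r in jr.items()]
--     triples.sort(key=lambda t: -t[0])
--     return [(r, [(j, sorted(t[2] for t in run))
--                  for j, run in _runs(sorted(grp, key=lambda t: t[1]), lambda t: t[1])])
--             for r, grp in _runs(triples, lambda t: t[0])]
-- ===== Notes on version B (the rewrite author's own statement) =====
-- stated objective: alternative
-- what changed: B replaces A's nested-defaultdict indexing pass (and its mutate-while-iterating second loop) by the sort-then-group strategy: flatten db1 to (ranking, job, name) triples once, sort per level, and split the key-contiguous lists into runs with one generic _runs helper.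
import Mathlib
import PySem

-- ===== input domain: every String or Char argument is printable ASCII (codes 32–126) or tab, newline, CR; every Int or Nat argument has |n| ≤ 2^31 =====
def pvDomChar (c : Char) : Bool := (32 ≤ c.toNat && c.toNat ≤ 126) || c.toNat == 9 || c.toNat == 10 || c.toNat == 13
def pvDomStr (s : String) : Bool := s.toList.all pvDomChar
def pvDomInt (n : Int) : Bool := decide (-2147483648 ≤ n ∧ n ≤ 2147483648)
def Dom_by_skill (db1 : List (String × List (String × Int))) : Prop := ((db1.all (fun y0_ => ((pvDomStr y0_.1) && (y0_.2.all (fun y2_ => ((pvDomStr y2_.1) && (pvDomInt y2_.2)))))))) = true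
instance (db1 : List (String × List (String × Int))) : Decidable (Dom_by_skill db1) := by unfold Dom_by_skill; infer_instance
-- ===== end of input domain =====

-- B replaces A's nested-defaultdict indexing pass by sort-then-group: flatten db1 to
-- (ranking, job, name) triples, sort per level, split the key-contiguous lists into runs
-- (objective: alternative, same cost).

-- ===== PORT A =====
-- answer[ranking][job].append(name), looping over db1.items() and each inner dict's items.
-- The two 'sorted(...)' calls sort lists of pairs whose FIRST components (dict keys) are
-- distinct, so Python's tuple comparison is decided by the first component: key (·.1).
def by_skill (db1 : List (String × List (String × Int))) : List (Int × (List (String × List String))) :=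
  let answer : PySem.Dict Int (PySem.Dict String (List String)) :=
    (PySem.Dict.ofList db1).items.foldl (fun ans nj =>
      (PySem.Dict.ofList nj.2).items.foldl (fun ans jr =>
        ans.modify jr.2 PySem.Dict.empty (fun d => d.modify jr.1 [] (fun l => l ++ [nj.1]))) ans)
      PySem.Dict.empty
  -- second loop: each value is replaced in place (keys and their order unchanged) ⇒ map over items
  let items2 := answer.items.map (fun rd =>
    (rd.1, (PySem.List.sorted rd.2.items (fun p => p.1) false).map
             (fun jp => (jp.1, PySem.List.sorted jp.2 (fun x => x) false))))
  PySem.List.sorted items2 (fun p => p.1) true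

-- ===== PORT B =====
-- _runs: split a key-contiguous list into (key, [items...]) runs; the reversed/insert(0)
-- Python loop is exactly a foldr that prepends to (or extends the front of) the run list.
def pvRuns {A K : Type} [BEq K] (key : A → K) (items : List A) : List (K × List A) :=
  items.foldr (fun x runs =>
    match runs with
    | (c, vs) :: rest => if c == key x then (c, x :: vs) :: rest else (key x, [x]) :: (c, vs) :: rest
    | [] => [(key x, [x])]) []

def pvTriples (db1 : List (String × List (String × Int))) : List (Int × String × String) :=
  (PySem.Dict.ofList db1).items.flatMap (fun nj =>
    (PySem.Dict.ofList nj.2).items.map (fun jr => (jr.2, jr.1, nj.1)))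

def by_skill_alt (db1 : List (String × List (String × Int))) : List (Int × (List (String × List String))) :=
  let triples := PySem.List.sorted (pvTriples db1) (fun t => -t.1) false
  (pvRuns (fun t => t.1) triples).map (fun rg =>
    (rg.1, (pvRuns (fun t => t.2.1) (PySem.List.sorted rg.2 (fun t => t.2.1) false)).map (fun jr =>
      (jr.1, PySem.List.sorted (jr.2.map (fun t => t.2.2)) (fun x => x) false))))

-- ===== PRECONDITION & SPEC =====
def Spec_by_skill (db1 : List (String × List (String × Int))) (out : List (Int × (List (String × List String)))) : Prop := out = by_skill_alt db1
instance (db1 : List (String × List (String × Int))) (out : List (Int × (List (String × List String)))) : Decidable (Spec_by_skill db1 out) := by unfold Spec_by_skill; infer_instance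

-- ===== CLAIM (what is proved, stated in full; the proofs are below) =====
def Claim_equal_by_skill : Prop := ∀ (db1 : List (String × List (String × Int))), Dom_by_skill db1 → Spec_by_skill db1 (by_skill db1)

-- ===== LEMMAS AND PROOFS =====

-- outer loop step on the flattened triple list (r, j, n)
def pvStepO (ans : PySem.Dict Int (PySem.Dict String (List String))) (t : Int × String × String) :
    PySem.Dict Int (PySem.Dict String (List String)) :=
  ans.modify t.1 PySem.Dict.empty (fun d => d.modify t.2.1 [] (fun l => l ++ [t.2.2]))

-- inner loop: append names job-wise
def pvInnerF (U : List (Int × String × String)) (d : PySem.Dict String (List String)) :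
    PySem.Dict String (List String) :=
  U.foldl (fun dd t => dd.modify t.2.1 [] (fun l => l ++ [t.2.2])) d

theorem pvInnerF_getD (U : List (Int × String × String)) (d : PySem.Dict String (List String)) (j : String) :
    (pvInnerF U d).getD j [] = d.getD j [] ++ (U.filter (fun t => t.2.1 == j)).map (fun t => t.2.2) := by
  have h : pvInnerF U d
      = (U.map (fun t => (t.2.1, t.2.2))).foldl (fun dd p => dd.modify p.1 [] (fun l => l ++ [p.2])) d := by
    rw [List.foldl_map]; rfl
  rw [h, PySem.Dict.getD_foldl_modify_append, List.filter_map, List.map_map]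
  rfl

theorem pvOuter_getD (T : List (Int × String × String))
    (d : PySem.Dict Int (PySem.Dict String (List String))) (r : Int) :
    (T.foldl pvStepO d).getD r PySem.Dict.empty
      = pvInnerF (T.filter (fun t => t.1 == r)) (d.getD r PySem.Dict.empty) := by
  induction T generalizing d with
  | nil => rfl
  | cons t T ih =>
      rw [List.foldl_cons, ih]
      by_cases h : t.1 = r
      · have hf : List.filter (fun u => u.1 == r) (t :: T) = t :: List.filter (fun u => u.1 == r) T := by
          simp [h]
        rw [hf]
        have : (pvStepO d t).getD r PySem.Dict.empty
            = (d.getD t.1 PySem.Dict.empty).modify t.2.1 [] (fun l => l ++ [t.2.2]) := by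
          rw [pvStepO, PySem.Dict.getD_modify, if_pos h.symm]
        rw [this, h]; rfl
      · have hf : List.filter (fun u => u.1 == r) (t :: T) = List.filter (fun u => u.1 == r) T := by
          simp [h]
        rw [hf]
        have : (pvStepO d t).getD r PySem.Dict.empty = d.getD r PySem.Dict.empty := by
          rw [pvStepO, PySem.Dict.getD_modify, if_neg (fun hh => h hh.symm)]
        rw [this]

theorem pvOuter_keys (T : List (Int × String × String)) :
    (T.foldl pvStepO PySem.Dict.empty).keys = PySem.Set.ofList (T.map (fun t => t.1)) := by
  have := PySem.Dict.keys_foldl_modify_key T (fun t => t.1) PySem.Dict.empty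
    (fun _ t => fun d => d.modify t.2.1 [] (fun l => l ++ [t.2.2])) PySem.Dict.empty
  rw [show (fun (d : PySem.Dict Int (PySem.Dict String (List String))) (t : Int × String × String) =>
        d.modify t.1 PySem.Dict.empty (fun dd => dd.modify t.2.1 [] (fun l => l ++ [t.2.2]))) = pvStepO from rfl] at this
  rw [this, PySem.Dict.keys_empty, PySem.Set.update_nil_left]

theorem pvOuter_nodup (T : List (Int × String × String)) :
    (T.foldl pvStepO PySem.Dict.empty).keys.Nodup := by
  rw [pvOuter_keys]; exact PySem.Set.nodup_ofList _

theorem pvInnerF_keys (U : List (Int × String × String)) :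
    (pvInnerF U PySem.Dict.empty).keys = PySem.Set.ofList (U.map (fun t => t.2.1)) := by
  have := PySem.Dict.keys_foldl_modify_key U (fun t => t.2.1) ([] : List String)
    (fun _ t => fun l => l ++ [t.2.2]) PySem.Dict.empty
  rw [pvInnerF, this, PySem.Dict.keys_empty, PySem.Set.update_nil_left]

theorem pvInnerF_nodup (U : List (Int × String × String)) :
    (pvInnerF U PySem.Dict.empty).keys.Nodup := by
  rw [pvInnerF_keys]; exact PySem.Set.nodup_ofList _

-- descending sorted set is pairwise >
theorem pvSorted_ofList_pairwise_gt {κ : Type} [LinearOrder κ] [BEq κ] [LawfulBEq κ] (xs : List κ) :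
    List.Pairwise (fun a b => b < a) (PySem.List.sorted (PySem.Set.ofList xs) (fun x => x) true) := by
  have hle := PySem.List.sorted_pairwise_rev (PySem.Set.ofList xs) (fun x => x)
  have hnd : (PySem.List.sorted (PySem.Set.ofList xs) (fun x => x) true).Nodup :=
    ((PySem.List.sorted_perm (PySem.Set.ofList xs) (fun x => x) true).nodup_iff).mpr
      (PySem.Set.nodup_ofList xs)
  exact (hle.and hnd).imp (fun h => lt_of_le_of_ne h.1 (Ne.symm h.2))

-- the inner dict, rendered as A's second loop renders it, equals B's per-rank job list
theorem pvInner_render (T : List (Int × String × String)) (r : Int) :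
    (PySem.List.sorted (pvInnerF (T.filter (fun t => t.1 == r)) PySem.Dict.empty).items
        (fun p => p.1) false).map
      (fun jp => (jp.1, PySem.List.sorted jp.2 (fun x => x) false))
    = (PySem.List.sorted (PySem.Set.ofList ((T.filter (fun t => t.1 == r)).map (fun t => t.2.1)))
        (fun x => x) false).map
        (fun j => (j, PySem.List.sorted ((T.filter (fun t => t.1 == r && t.2.1 == j)).map (fun t => t.2.2))
            (fun x => x) false)) := by
  set U := T.filter (fun t => t.1 == r) with hU
  set data := pvInnerF U PySem.Dict.empty with hdata
  have hkeys : data.keys = PySem.Set.ofList (U.map (fun t => t.2.1)) := pvInnerF_keys U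
  have hnd : data.keys.Nodup := pvInnerF_nodup U
  -- sorted(data.items()) = sorted(keys) paired with their values
  have hsorted : PySem.List.sorted data.items (fun p => p.1) false
      = (PySem.List.sorted (PySem.Set.ofList (U.map (fun t => t.2.1))) (fun x => x) false).map
          (fun j => (j, data.getD j [])) := by
    apply PySem.List.sorted_eq_of_perm_of_pairwise_lt
    · rw [PySem.Dict.items_eq_map_keys data hnd ([] : List String), hkeys]
      exact (PySem.List.sorted_perm _ _ _).map _
    · rw [List.pairwise_map]
      exact PySem.List.sorted_ofList_pairwise_lt _
  rw [hsorted, List.map_map]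
  apply List.map_congr_left
  intro j _
  simp only [Function.comp]
  congr 1
  rw [pvInnerF_getD, PySem.Dict.getD_empty, List.nil_append, hU, List.filter_filter]
  congr 1
  congr 1
  apply List.filter_congr
  intro t _
  exact Bool.and_comm _ _

-- A's whole pipeline on the flattened triples equals B's canonical form
theorem pvMain (T : List (Int × String × String)) :
    PySem.List.sorted
      ((T.foldl pvStepO PySem.Dict.empty).items.map (fun rd =>
        (rd.1, (PySem.List.sorted rd.2.items (fun p => p.1) false).map
                 (fun jp => (jp.1, PySem.List.sorted jp.2 (fun x => x) false)))))
      (fun p => p.1) true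
    = (PySem.List.sorted (PySem.Set.ofList (T.map (fun t => t.1))) (fun x => x) true).map (fun r =>
        (r, (PySem.List.sorted (PySem.Set.ofList ((T.filter (fun t => t.1 == r)).map (fun t => t.2.1)))
              (fun x => x) false).map
            (fun j => (j, PySem.List.sorted ((T.filter (fun t => t.1 == r && t.2.1 == j)).map (fun t => t.2.2))
                (fun x => x) false)))) := by
  set ans := T.foldl pvStepO PySem.Dict.empty with hans
  have hitems : ans.items
      = (PySem.Set.ofList (T.map (fun t => t.1))).map
          (fun r => (r, pvInnerF (T.filter (fun t => t.1 == r)) PySem.Dict.empty)) := by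
    rw [PySem.Dict.items_eq_map_keys ans (pvOuter_nodup T) PySem.Dict.empty, pvOuter_keys]
    apply List.map_congr_left
    intro r _
    rw [hans, pvOuter_getD, PySem.Dict.getD_empty]
  apply PySem.List.sorted_rev_eq_of_perm_of_pairwise_gt
  · rw [hitems, List.map_map]
    have := ((PySem.List.sorted_perm (PySem.Set.ofList (T.map (fun t => t.1))) (fun x => x) true).map
      (fun r => (r, (PySem.List.sorted (PySem.Set.ofList ((T.filter (fun t => t.1 == r)).map (fun t => t.2.1)))
              (fun x => x) false).map
            (fun j => (j, PySem.List.sorted ((T.filter (fun t => t.1 == r && t.2.1 == j)).map (fun t => t.2.2))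
                (fun x => x) false)))))
    refine this.trans (List.Perm.of_eq ?_)
    apply List.map_congr_left
    intro r _
    simp only [Function.comp]
    rw [← pvInner_render]
  · rw [List.pairwise_map]
    exact pvSorted_ofList_pairwise_gt _

-- ===== B-side lemmas =====

theorem pvOfList_sublist {α : Type} [BEq α] [LawfulBEq α] :
    ∀ (l : List α), (PySem.Set.ofList l).Sublist l := by
  intro l
  induction l with
  | nil => simp
  | cons x t ih =>
      rw [PySem.Set.ofList_cons]
      refine List.Sublist.cons₂ x ?_
      exact List.Sublist.trans (List.filter_sublist) ih

theorem pvDiscard_of_not_mem {α : Type} [BEq α] [LawfulBEq α] (s : PySem.Set α) (x : α)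
    (h : x ∉ s) : s.discard x = s := by
  unfold PySem.Set.discard
  rw [List.filter_eq_self]
  intro a ha
  have hax : a ≠ x := fun hax => h (hax ▸ ha)
  simp [hax]

theorem pvOfList_cons_cons {α : Type} [BEq α] [LawfulBEq α] (x : α) (l : List α) :
    PySem.Set.ofList (x :: x :: l) = PySem.Set.ofList (x :: l) := by
  rw [PySem.Set.ofList_cons, PySem.Set.ofList_cons]
  congr 1
  have h1 : PySem.Set.discard (x :: (PySem.Set.ofList l).discard x) x
      = ((PySem.Set.ofList l).discard x).discard x := by
    unfold PySem.Set.discard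
    rw [List.filter_cons_of_neg (by simp)]
  rw [h1]
  unfold PySem.Set.discard
  rw [List.filter_filter]
  apply List.filter_congr
  intro a _
  simp

-- a key-monotone list splits into (label, run) pairs: labels are the deduped label list,
-- each run is the filter at its label
theorem pvRuns_eq {A KT G : Type} [LinearOrder KT] [BEq G] [LawfulBEq G]
    (K : A → KT) (g : A → G) (hKg : ∀ a b : A, K a = K b ↔ g a = g b) :
    ∀ (xs : List A), xs.Pairwise (fun a b => K a ≤ K b) →
    pvRuns g xs = (PySem.Set.ofList (xs.map g)).map (fun c => (c, xs.filter (fun a => g a == c))) := by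
  intro xs
  induction xs with
  | nil => intro _; rfl
  | cons x t ih =>
      intro hs
      have hx : ∀ y ∈ t, K x ≤ K y := (List.pairwise_cons.mp hs).1
      have ht : t.Pairwise (fun a b => K a ≤ K b) := (List.pairwise_cons.mp hs).2
      cases t with
      | nil =>
          have h1 : pvRuns g [x] = [(g x, [x])] := rfl
          have h2 : PySem.Set.ofList ([x].map g) = [g x] := rfl
          rw [h1, h2, List.map_cons, List.map_nil, List.filter_cons_of_pos (by simp),
            List.filter_nil]
      | cons y t' =>
          have hofl : PySem.Set.ofList ((y :: t').map g)
              = g y :: (PySem.Set.ofList (t'.map g)).discard (g y) := by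
            rw [List.map_cons, PySem.Set.ofList_cons]
          have hrec : pvRuns g (y :: t')
              = (g y, (y :: t').filter (fun a => g a == g y))
                  :: ((PySem.Set.ofList (t'.map g)).discard (g y)).map
                      (fun c => (c, (y :: t').filter (fun a => g a == c))) := by
            rw [ih ht, hofl, List.map_cons]
          have hstep : pvRuns g (x :: y :: t')
              = if (g y == g x) = true
                then (g y, x :: (y :: t').filter (fun a => g a == g y))
                    :: ((PySem.Set.ofList (t'.map g)).discard (g y)).map
                        (fun c => (c, (y :: t').filter (fun a => g a == c)))
                else (g x, [x]) :: pvRuns g (y :: t') := by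
            show (match pvRuns g (y :: t') with
                  | (c, vs) :: rest => if (c == g x) = true then (c, x :: vs) :: rest
                      else (g x, [x]) :: (c, vs) :: rest
                  | [] => [(g x, [x])]) = _
            rw [hrec]
          by_cases hmem : g x ∈ (y :: t').map g
          · -- the run continues: x carries the same label as the head of the tail
            have hgy : g y = g x := by
              rcases List.mem_map.mp hmem with ⟨z, hz, hgz⟩
              rcases List.mem_cons.mp hz with rfl | hz'
              · exact hgz
              · by_contra hne
                have h1 : K x ≤ K y := hx y List.mem_cons_self
                have h2 : K y ≤ K z := (List.pairwise_cons.mp ht).1 z hz'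
                have h3 : K z = K x := (hKg z x).mpr hgz
                have : K x = K y := le_antisymm h1 (h3 ▸ h2)
                exact hne ((hKg y x).mp this.symm)
            have hlabels : PySem.Set.ofList ((x :: y :: t').map g)
                = PySem.Set.ofList ((y :: t').map g) := by
              rw [List.map_cons (l := y :: t'), List.map_cons, ← hgy]
              exact pvOfList_cons_cons _ _
            rw [hstep, if_pos (by simp [hgy]), hlabels, hofl, List.map_cons]
            congr 1
            · -- the head run gains x
              simp [hgy]
            · -- later runs have labels ≠ g x, so the filter ignores x
              apply List.map_congr_left
              intro c hc
              have hne : c ≠ g y := ((PySem.Set.mem_discard _ _ _).mp hc).2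
              have hnx : ¬ ((g x == c) = true) := by
                simp only [beq_iff_eq]
                rintro rfl
                exact hne hgy.symm
              simp [List.filter_cons, hnx]
          · -- a new label: x opens a fresh run in front
            have hgy : ¬ (g y == g x) = true := by
              simp only [beq_iff_eq]
              intro h; exact hmem (List.mem_map.mpr ⟨y, List.mem_cons_self, h⟩)
            have hlabels : PySem.Set.ofList ((x :: y :: t').map g)
                = g x :: PySem.Set.ofList ((y :: t').map g) := by
              rw [show (x :: y :: t').map g = g x :: (y :: t').map g from rfl, PySem.Set.ofList_cons]
              congr 1
              apply pvDiscard_of_not_mem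
              rw [PySem.Set.mem_ofList]
              exact hmem
            rw [hstep, if_neg hgy, hlabels, List.map_cons, ih ht]
            congr 1
            · -- the new run is exactly [x]
              have hnil : (y :: t').filter (fun a => g a == g x) = [] := by
                rw [List.filter_eq_nil_iff]
                intro a ha
                simp only [beq_iff_eq]
                intro h; exact hmem (List.mem_map.mpr ⟨a, ha, h⟩)
              simp [hnil]
            · apply List.map_congr_left
              intro c hc
              have hcm : c ∈ (y :: t').map g := (PySem.Set.mem_ofList _ c).mp hc
              have hne : ¬ ((g x == c) = true) := by
                simp only [beq_iff_eq]
                intro h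
                exact hmem (h ▸ hcm)
              simp [List.filter_cons, hne]

-- sort-then-group (B's pipeline) also produces the canonical form
theorem pvAltGen (T : List (Int × String × String)) :
    (pvRuns (fun t => t.1) (PySem.List.sorted T (fun t => -t.1) false)).map (fun rg =>
      (rg.1, (pvRuns (fun t => t.2.1) (PySem.List.sorted rg.2 (fun t => t.2.1) false)).map (fun jr =>
        (jr.1, PySem.List.sorted (jr.2.map (fun t => t.2.2)) (fun x => x) false))))
    = (PySem.List.sorted (PySem.Set.ofList (T.map (fun t => t.1))) (fun x => x) true).map (fun r =>
        (r, (PySem.List.sorted (PySem.Set.ofList ((T.filter (fun t => t.1 == r)).map (fun t => t.2.1)))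
              (fun x => x) false).map
            (fun j => (j, PySem.List.sorted ((T.filter (fun t => t.1 == r && t.2.1 == j)).map (fun t => t.2.2))
                (fun x => x) false)))) := by
  set S := PySem.List.sorted T (fun t => -t.1) false with hSdef
  have hSP : S.Perm T := PySem.List.sorted_perm T (fun t => -t.1) false
  have hsp : S.Pairwise (fun a b => -a.1 ≤ -b.1) := PySem.List.sorted_pairwise T (fun t => -t.1)
  have h1 : pvRuns (fun t : Int × String × String => t.1) S
      = (PySem.Set.ofList (S.map (fun t => t.1))).map
          (fun r => (r, S.filter (fun t => t.1 == r))) :=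
    pvRuns_eq (fun t => -t.1) (fun t => t.1) (by intro a b; show (-a.1 = -b.1) ↔ (a.1 = b.1); omega) S hsp
  have h2 : PySem.Set.ofList (S.map (fun t => t.1))
      = PySem.List.sorted (PySem.Set.ofList (T.map (fun t => t.1))) (fun x => x) true := by
    symm
    apply PySem.List.sorted_rev_eq_of_perm_of_pairwise_gt
    · refine (List.perm_ext_iff_of_nodup (PySem.Set.nodup_ofList _) (PySem.Set.nodup_ofList _)).mpr ?_
      intro a
      simp only [PySem.Set.mem_ofList, List.mem_map]
      constructor <;> rintro ⟨t, ht, rfl⟩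
      · exact ⟨t, hSP.mem_iff.mp ht, rfl⟩
      · exact ⟨t, hSP.mem_iff.mpr ht, rfl⟩
    · have hmap : (S.map (fun t => t.1)).Pairwise (fun a b => b ≤ a) :=
        List.pairwise_map.mpr (hsp.imp (by intro a b h; omega))
      have hle : (PySem.Set.ofList (S.map (fun t => t.1))).Pairwise (fun a b => b ≤ a) :=
        hmap.sublist (pvOfList_sublist _)
      have hnd : (PySem.Set.ofList (S.map (fun t => t.1))).Pairwise (· ≠ ·) :=
        PySem.Set.nodup_ofList _
      exact (hle.and hnd).imp (fun h => lt_of_le_of_ne h.1 (Ne.symm h.2))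
  rw [h1, h2, List.map_map]
  apply List.map_congr_left
  intro r _
  simp only [Function.comp]
  congr 1
  -- per-rank: sort the run by job and group again
  set G := PySem.List.sorted (S.filter (fun t => t.1 == r)) (fun t => t.2.1) false with hGdef
  have hGP : G.Perm (T.filter (fun t => t.1 == r)) :=
    (PySem.List.sorted_perm _ _ _).trans (hSP.filter _)
  have hgp : G.Pairwise (fun a b => a.2.1 ≤ b.2.1) :=
    PySem.List.sorted_pairwise (S.filter (fun t => t.1 == r)) (fun t => t.2.1)
  have h3 : pvRuns (fun t : Int × String × String => t.2.1) G
      = (PySem.Set.ofList (G.map (fun t => t.2.1))).map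
          (fun j => (j, G.filter (fun t => t.2.1 == j))) :=
    pvRuns_eq (fun t => t.2.1) (fun t => t.2.1) (by intro a b; exact Iff.rfl) G hgp
  have h4 : PySem.Set.ofList (G.map (fun t => t.2.1))
      = PySem.List.sorted (PySem.Set.ofList ((T.filter (fun t => t.1 == r)).map (fun t => t.2.1)))
          (fun x => x) false := by
    symm
    apply PySem.List.sorted_eq_of_perm_of_pairwise_lt
    · refine (List.perm_ext_iff_of_nodup (PySem.Set.nodup_ofList _) (PySem.Set.nodup_ofList _)).mpr ?_
      intro a
      simp only [PySem.Set.mem_ofList, List.mem_map]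
      constructor <;> rintro ⟨t, ht, rfl⟩
      · exact ⟨t, hGP.mem_iff.mp ht, rfl⟩
      · exact ⟨t, hGP.mem_iff.mpr ht, rfl⟩
    · have hmap : (G.map (fun t => t.2.1)).Pairwise (fun a b => a ≤ b) :=
        List.pairwise_map.mpr hgp
      have hle : (PySem.Set.ofList (G.map (fun t => t.2.1))).Pairwise (fun a b => a ≤ b) :=
        hmap.sublist (pvOfList_sublist _)
      have hnd : (PySem.Set.ofList (G.map (fun t => t.2.1))).Pairwise (· ≠ ·) :=
        PySem.Set.nodup_ofList _
      exact (hle.and hnd).imp (fun h => lt_of_le_of_ne h.1 h.2)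
  rw [h3, h4, List.map_map]
  apply List.map_congr_left
  intro j _
  simp only [Function.comp]
  congr 1
  -- per-job: the run's names are a rearrangement of the doubly filtered names
  apply PySem.List.sorted_eq_sorted_of_perm _ _ _ (fun a b h => h)
  have hperm : (G.filter (fun t => t.2.1 == j)).Perm
      (T.filter (fun t => t.1 == r && t.2.1 == j)) := by
    have p1 : (G.filter (fun t => t.2.1 == j)).Perm
        ((S.filter (fun t => t.1 == r)).filter (fun t => t.2.1 == j)) :=
      (PySem.List.sorted_perm _ _ _).filter _
    have p2 : (S.filter (fun t => t.1 == r)).filter (fun t => t.2.1 == j)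
        = S.filter (fun t => t.1 == r && t.2.1 == j) := by
      rw [List.filter_filter]
      apply List.filter_congr
      intro t _
      exact Bool.and_comm _ _
    have p3 : (S.filter (fun t => t.1 == r && t.2.1 == j)).Perm
        (T.filter (fun t => t.1 == r && t.2.1 == j)) := hSP.filter _
    exact p1.trans (p2 ▸ p3)
  exact hperm.map _

-- ===== VERDICT (by name: the statement is the Claim_ definition above) =====
theorem by_skill_spec : Claim_equal_by_skill := by
  intro db1 _
  show by_skill db1 = by_skill_alt db1
  rw [by_skill]
  have hstep : (fun (ans : PySem.Dict Int (PySem.Dict String (List String)))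
        (nj : String × List (String × Int)) =>
      (PySem.Dict.ofList nj.2).items.foldl (fun ans jr =>
        ans.modify jr.2 PySem.Dict.empty (fun d => d.modify jr.1 [] (fun l => l ++ [nj.1]))) ans)
      = (fun ans nj =>
          ((PySem.Dict.ofList nj.2).items.map (fun jr => (jr.2, jr.1, nj.1))).foldl pvStepO ans) := by
    funext ans nj
    rw [List.foldl_map]
    rfl
  rw [hstep, ← List.foldl_flatMap]
  refine (pvMain (pvTriples db1)).trans ?_
  exact (pvAltGen (pvTriples db1)).symm
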